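-- pv_equiv track=rewrite | github.com/madhavUF/personal-exec-agent | src/agent.py | _derive_intent
-- ===== SOURCE A (Python) =====
-- def _derive_intent(tools_used: list[str]) -> str:
--     """Map tool names used → UI badge intent string."""
--     if not tools_used:
--         return "general"
--     if any(t in tools_used for t in ("get_daily_goals", "save_daily_goals", "update_goal_status")):
--         return "goals"
--     if any(t in tools_used for t in ("search_documents", "save_document")):
--         return "documents"
--     if any(t in tools_used for t in ("get_recent_emails", "search_emails", "send_email", "create_email_draft")):
--         return "email"
--     if "get_calendar_events" in tools_used:
--         return "calendar"
--     return "general"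
-- ===== SOURCE B (Python) =====
-- TOOL_TO_INTENT = {
--     "get_daily_goals": "goals",
--     "save_daily_goals": "goals",
--     "update_goal_status": "goals",
--     "search_documents": "documents",
--     "save_document": "documents",
--     "get_recent_emails": "email",
--     "search_emails": "email",
--     "send_email": "email",
--     "create_email_draft": "email",
--     "get_calendar_events": "calendar",
-- }
--
-- _PRIORITY = ("goals", "documents", "email", "calendar")
--
--
-- def _derive_intent(tools_used: list[str]) -> str:
--     """Map tool names used → UI badge intent string."""
--     present = set()
--     for t in tools_used:
--         intent = TOOL_TO_INTENT.get(t)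
--         if intent is not None:
--             present.add(intent)
--     for intent in _PRIORITY:
--         if intent in present:
--             return intent
--     return "general"
-- ===== Notes on version B (the rewrite author's own statement) =====
-- stated objective: idiomatic
-- what changed: Replaced the chain of per-group membership scans over tools_used with a flat tool-to-intent lookup table, one pass over tools_used collecting present intents into a set, and a scan of the fixed priority list.
import Mathlib
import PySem

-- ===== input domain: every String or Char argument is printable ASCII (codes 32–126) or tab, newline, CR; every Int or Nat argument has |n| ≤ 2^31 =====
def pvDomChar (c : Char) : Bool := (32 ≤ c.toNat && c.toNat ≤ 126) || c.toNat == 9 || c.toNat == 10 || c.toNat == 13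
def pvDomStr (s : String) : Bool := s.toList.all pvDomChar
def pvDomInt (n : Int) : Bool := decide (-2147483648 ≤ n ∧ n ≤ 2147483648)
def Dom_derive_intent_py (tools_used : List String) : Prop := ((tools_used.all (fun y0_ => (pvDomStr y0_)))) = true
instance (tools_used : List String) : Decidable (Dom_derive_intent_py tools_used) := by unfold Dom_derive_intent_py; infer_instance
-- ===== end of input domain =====

-- B replaces A's per-group membership scans by a flat tool→intent table, a single
-- collecting pass into a set, and a scan of the fixed priority list (idiomatic).


-- ===== PORT A =====
-- literal transliteration of A: empty check, then one `any` membership scan per group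
def derive_intent_py (tools_used : List String) : String :=
  if tools_used = [] then "general"
  else if (["get_daily_goals", "save_daily_goals", "update_goal_status"].any
      (fun t => tools_used.contains t)) then "goals"
  else if (["search_documents", "save_document"].any
      (fun t => tools_used.contains t)) then "documents"
  else if (["get_recent_emails", "search_emails", "send_email", "create_email_draft"].any
      (fun t => tools_used.contains t)) then "email"
  else if tools_used.contains "get_calendar_events" then "calendar"
  else "general"

-- ===== PORT B =====
-- TOOL_TO_INTENT as a PySem.Dict (association list, insertion order)
def pvToolToIntent : PySem.Dict String String := PySem.Dict.mk
  [("get_daily_goals", "goals"), ("save_daily_goals", "goals"), ("update_goal_status", "goals"),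
   ("search_documents", "documents"), ("save_document", "documents"),
   ("get_recent_emails", "email"), ("search_emails", "email"), ("send_email", "email"),
   ("create_email_draft", "email"), ("get_calendar_events", "calendar")]

def pvPriority : List String := ["goals", "documents", "email", "calendar"]

-- one collecting step of B's first loop: present.add(intent) when the lookup hits
def pvStep (present : PySem.Set String) (t : String) : PySem.Set String :=
  match pvToolToIntent.get? t with
  | some intent => PySem.Set.add present intent
  | none => present

def derive_intent_py_alt (tools_used : List String) : String :=
  let present : PySem.Set String := tools_used.foldl pvStep PySem.Set.empty
  match pvPriority.find? (fun intent => PySem.Set.contains present intent) with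
  | some intent => intent
  | none => "general"

-- ===== PRECONDITION & SPEC =====
def Spec_derive_intent_py (tools_used : List String) (out : String) : Prop := out = derive_intent_py_alt tools_used
instance (tools_used : List String) (out : String) : Decidable (Spec_derive_intent_py tools_used out) := by unfold Spec_derive_intent_py; infer_instance

-- ===== CLAIM (what is proved, stated in full; the proofs are below) =====
def Claim_equal_derive_intent_py : Prop := ∀ (tools_used : List String), Dom_derive_intent_py tools_used → Spec_derive_intent_py tools_used (derive_intent_py tools_used)

-- ===== LEMMAS AND PROOFS =====

-- membership in the collected set ↔ some tool of the list maps to that intent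
theorem pv_mem_fold (tools : List String) (s : PySem.Set String) (i : String) :
    i ∈ tools.foldl pvStep s ↔ i ∈ s ∨ ∃ t ∈ tools, pvToolToIntent.get? t = some i := by
  induction tools generalizing s with
  | nil => simp
  | cons t ts ih =>
    simp only [List.foldl_cons, pvStep]
    cases h : pvToolToIntent.get? t with
    | none => simp [ih, h]
    | some j =>
      simp only [ih, PySem.Set.mem_add, List.mem_cons]
      constructor
      · rintro (⟨hs | rfl⟩ | ⟨u, hu, hget⟩)
        · exact Or.inl hs
        · exact Or.inr ⟨t, Or.inl rfl, h⟩
        · exact Or.inr ⟨u, Or.inr hu, hget⟩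
      · rintro (hs | ⟨u, (rfl | hu), hget⟩)
        · exact Or.inl (Or.inl hs)
        · rw [h] at hget; exact Or.inl (Or.inr (Option.some_inj.mp hget).symm)
        · exact Or.inr ⟨u, hu, hget⟩

-- a tool maps to intent i ↔ it is one of i's tool names (for each of the four intents)
theorem pv_lookup_goals (t : String) :
    pvToolToIntent.get? t = some "goals"
      ↔ t = "get_daily_goals" ∨ t = "save_daily_goals" ∨ t = "update_goal_status" := by
  simp only [pvToolToIntent, PySem.Dict.get?_mk_cons]
  repeat' split
  all_goals simp_all [PySem.Dict.get?]
  all_goals first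
    | (subst_vars; decide)
    | aesop

theorem pv_lookup_documents (t : String) :
    pvToolToIntent.get? t = some "documents"
      ↔ t = "search_documents" ∨ t = "save_document" := by
  simp only [pvToolToIntent, PySem.Dict.get?_mk_cons]
  repeat' split
  all_goals simp_all [PySem.Dict.get?]
  all_goals first
    | (subst_vars; decide)
    | aesop

theorem pv_lookup_email (t : String) :
    pvToolToIntent.get? t = some "email"
      ↔ t = "get_recent_emails" ∨ t = "search_emails" ∨ t = "send_email" ∨ t = "create_email_draft" := by
  simp only [pvToolToIntent, PySem.Dict.get?_mk_cons]
  repeat' split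
  all_goals simp_all [PySem.Dict.get?]
  all_goals first
    | (subst_vars; decide)
    | aesop

theorem pv_lookup_calendar (t : String) :
    pvToolToIntent.get? t = some "calendar" ↔ t = "get_calendar_events" := by
  simp only [pvToolToIntent, PySem.Dict.get?_mk_cons]
  repeat' split
  all_goals simp_all [PySem.Dict.get?]
  all_goals first
    | (subst_vars; decide)
    | aesop

-- contains on the collected set, per intent, as the disjunction of membership tests
theorem pv_present_goals (tools : List String) :
    PySem.Set.contains (tools.foldl pvStep PySem.Set.empty) "goals"
      = (tools.contains "get_daily_goals" || (tools.contains "save_daily_goals" || tools.contains "update_goal_status")) := by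
  rw [Bool.eq_iff_iff]
  simp only [PySem.Set.contains_eq_listContains, List.contains_iff_mem, Bool.or_eq_true,
    pv_mem_fold, pv_lookup_goals, PySem.Set.empty]
  simp only [List.not_mem_nil, false_or]
  constructor
  · rintro ⟨u, hu, (rfl | rfl | rfl)⟩ <;> tauto
  · rintro (h | h | h) <;> exact ⟨_, h, by tauto⟩

theorem pv_present_documents (tools : List String) :
    PySem.Set.contains (tools.foldl pvStep PySem.Set.empty) "documents"
      = (tools.contains "search_documents" || tools.contains "save_document") := by
  rw [Bool.eq_iff_iff]
  simp only [PySem.Set.contains_eq_listContains, List.contains_iff_mem, Bool.or_eq_true,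
    pv_mem_fold, pv_lookup_documents, PySem.Set.empty]
  simp only [List.not_mem_nil, false_or]
  constructor
  · rintro ⟨u, hu, (rfl | rfl)⟩ <;> tauto
  · rintro (h | h) <;> exact ⟨_, h, by tauto⟩

theorem pv_present_email (tools : List String) :
    PySem.Set.contains (tools.foldl pvStep PySem.Set.empty) "email"
      = (tools.contains "get_recent_emails" || (tools.contains "search_emails" || (tools.contains "send_email" || tools.contains "create_email_draft"))) := by
  rw [Bool.eq_iff_iff]
  simp only [PySem.Set.contains_eq_listContains, List.contains_iff_mem, Bool.or_eq_true,
    pv_mem_fold, pv_lookup_email, PySem.Set.empty]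
  simp only [List.not_mem_nil, false_or]
  constructor
  · rintro ⟨u, hu, (rfl | rfl | rfl | rfl)⟩ <;> tauto
  · rintro (h | h | h | h) <;> exact ⟨_, h, by tauto⟩

theorem pv_present_calendar (tools : List String) :
    PySem.Set.contains (tools.foldl pvStep PySem.Set.empty) "calendar"
      = tools.contains "get_calendar_events" := by
  rw [Bool.eq_iff_iff]
  simp only [PySem.Set.contains_eq_listContains, List.contains_iff_mem,
    pv_mem_fold, pv_lookup_calendar, PySem.Set.empty]
  simp only [List.not_mem_nil, false_or]
  constructor
  · rintro ⟨u, hu, rfl⟩; exact hu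
  · intro h; exact ⟨_, h, rfl⟩

-- ===== VERDICT (by name: the statement is the Claim_ definition above) =====
theorem derive_intent_py_spec : Claim_equal_derive_intent_py := by
  intro tools _
  unfold Spec_derive_intent_py derive_intent_py derive_intent_py_alt
  simp only [pvPriority, List.find?, pv_present_goals, pv_present_documents,
    pv_present_email, pv_present_calendar, List.any_cons, List.any_nil, Bool.or_false]
  rcases tools with _ | ⟨t, ts⟩
  · rfl
  · simp only [if_neg (List.cons_ne_nil t ts)]
    generalize ((t :: ts).contains "get_daily_goals" || ((t :: ts).contains "save_daily_goals" || (t :: ts).contains "update_goal_status")) = g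
    generalize ((t :: ts).contains "search_documents" || (t :: ts).contains "save_document") = d
    generalize ((t :: ts).contains "get_recent_emails" || ((t :: ts).contains "search_emails" || ((t :: ts).contains "send_email" || (t :: ts).contains "create_email_draft"))) = e
    generalize (t :: ts).contains "get_calendar_events" = c
    cases g <;> cases d <;> cases e <;> cases c <;> rfl
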